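-- pv_equiv track=rewrite | github.com/raistln/recetario_whatsapp | src/recetario_whatsapp/extractor.py | _es_url
-- ===== SOURCE A (Python) =====
-- def _es_url(texto: str) -> bool:
--     if not texto:
--         return False
--     texto = texto.strip().lower()
--     patrones = [
--         "http://",
--         "https://",
--         "www.",
--         ".jpg",
--         ".jpeg",
--         ".png",
--         ".gif",
--         ".webp",
--     ]
--     return any(patron in texto for patron in patrones)
-- ===== SOURCE B (Python) =====
-- _PATRONES = [
--     "http://", "https://", "www.", ".jpg", ".jpeg", ".png", ".gif", ".webp",
-- ]
--
--
-- def _build_trie(patterns):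
--     trie = {}
--     for word in patterns:
--         node = trie
--         for ch in word:
--             node = node.setdefault(ch, {})
--         node[""] = True  # terminal marker
--     return trie
--
--
-- _TRIE = _build_trie(_PATRONES)
--
--
-- def _es_url(texto: str) -> bool:
--     if not texto:
--         return False
--     t = texto.strip().lower()
--     n = len(t)
--     for i in range(n):
--         node = _TRIE
--         j = i
--         while True:
--             if "" in node:
--                 return True
--             if j >= n:
--                 break
--             nxt = node.get(t[j])
--             if nxt is None:
--                 break
--             node = nxt
--             j += 1
--     return False
-- ===== Notes on version B (the rewrite author's own statement) =====
-- stated objective: alternative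
-- what changed: Replaces A's k independent substring scans (any(p in t)) with a trie of the patterns built once, then a single loop over text positions that walks the trie from each position, so all patterns are matched simultaneously sharing common prefixes.
import Mathlib
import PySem

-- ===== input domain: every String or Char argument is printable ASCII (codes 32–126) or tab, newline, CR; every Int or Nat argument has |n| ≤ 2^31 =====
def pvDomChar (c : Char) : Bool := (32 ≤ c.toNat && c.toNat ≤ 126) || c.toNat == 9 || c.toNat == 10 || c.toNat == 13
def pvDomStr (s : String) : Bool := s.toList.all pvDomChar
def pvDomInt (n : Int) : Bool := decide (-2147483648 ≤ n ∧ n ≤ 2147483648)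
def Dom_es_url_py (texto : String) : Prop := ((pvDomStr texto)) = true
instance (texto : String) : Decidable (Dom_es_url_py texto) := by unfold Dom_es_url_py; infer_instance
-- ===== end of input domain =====

-- B replaces A's k independent substring scans with a trie of the patterns built once,
-- walked from each text position (objective: alternative — a different data structure).

-- the shared pattern list
def pvPatrones : List (List Char) :=
  ["http://".toList, "https://".toList, "www.".toList, ".jpg".toList,
   ".jpeg".toList, ".png".toList, ".gif".toList, ".webp".toList]

-- ===== PORT A =====
def es_url_py (texto : String) : Bool :=
  if texto.toList = [] then false
  else
    let t := PySem.Chars.lower (PySem.Chars.strip texto.toList)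
    pvPatrones.any (fun patron => PySem.Chars.isIn patron t)

-- ===== PORT B =====
-- trie node: terminal flag + association chain of children (Python's nested dicts;
-- the child dict is encoded as the sanctioned explicit sibling chain PvKids)
inductive PvKids where
  | nil
  | cons (c : Char) (term : Bool) (sub : PvKids) (rest : PvKids)

-- a trie node is (terminal flag, child chain)
-- node.get(ch) on the child chain
def pvFindC : PvKids → Char → Option (Bool × PvKids)
  | .nil, _ => none
  | .cons c' tm sub rest, c => if c' = c then some (tm, sub) else pvFindC rest c

-- node.setdefault(ch, {}) followed by the recursive descent, functionally
def pvUpdateKids (kids : PvKids) (c : Char) (f : Bool × PvKids → Bool × PvKids) : PvKids :=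
  match kids with
  | .nil => .cons c (f (false, .nil)).1 (f (false, .nil)).2 .nil
  | .cons c' tm sub rest =>
      if c' = c then .cons c' (f (tm, sub)).1 (f (tm, sub)).2 rest
      else .cons c' tm sub (pvUpdateKids rest c f)

-- insert one pattern (the inner "for ch in word" loop of _build_trie)
def pvInsert : Bool × PvKids → List Char → Bool × PvKids
  | (_, kids), [] => (true, kids)
  | (tm, kids), c :: w => (tm, pvUpdateKids kids c (fun n => pvInsert n w))

-- _TRIE = _build_trie(_PATRONES)
def pvTrie : Bool × PvKids := pvPatrones.foldl pvInsert (false, .nil)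

-- the inner "while True" walk from one position
def pvStep : Bool × PvKids → List Char → Bool
  | (term, _), [] => term
  | (term, kids), c :: cs =>
      term || (match pvFindC kids c with
               | none => false
               | some n => pvStep n cs)

-- the outer "for i in range(n)" loop, as recursion over the suffixes
def pvScanB : List Char → Bool
  | [] => false
  | c :: rest => pvStep pvTrie (c :: rest) || pvScanB rest

def es_url_py_alt (texto : String) : Bool :=
  if texto.toList = [] then false
  else pvScanB (PySem.Chars.lower (PySem.Chars.strip texto.toList))

-- ===== PRECONDITION & SPEC =====
def Spec_es_url_py (texto : String) (out : Bool) : Prop := out = es_url_py_alt texto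
instance (texto : String) (out : Bool) : Decidable (Spec_es_url_py texto out) := by unfold Spec_es_url_py; infer_instance

-- ===== CLAIM (what is proved, stated in full; the proofs are below) =====
def Claim_equal_es_url_py : Prop := ∀ (texto : String), Dom_es_url_py texto → Spec_es_url_py texto (es_url_py texto)

-- ===== LEMMAS AND PROOFS =====

-- proof-side semantics of a trie: does walking the whole word end at a terminal node?
def pvAccepts : Bool × PvKids → List Char → Bool
  | (term, _), [] => term
  | (_, kids), c :: w =>
      match pvFindC kids c with
      | none => false
      | some n => pvAccepts n w

theorem pvAccepts_empty (v : List Char) : pvAccepts (false, .nil) v = false := by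
  cases v <;> simp [pvAccepts, pvFindC]

theorem pvFindC_update (kids : PvKids) (c : Char) (f : Bool × PvKids → Bool × PvKids) (c' : Char) :
    pvFindC (pvUpdateKids kids c f) c' =
      if c' = c then some (f ((pvFindC kids c).getD (false, .nil))) else pvFindC kids c' := by
  induction kids with
  | nil =>
    by_cases h : c' = c
    · subst h; simp [pvUpdateKids, pvFindC]
    · simp [pvUpdateKids, pvFindC, h, Ne.symm h]
  | cons c₀ tm sub rest ih_sub ih_rest =>
    by_cases h0 : c₀ = c
    · subst h0
      by_cases h : c' = c₀
      · subst h; simp [pvUpdateKids, pvFindC]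
      · simp [pvUpdateKids, pvFindC, h, Ne.symm h]
    · simp only [pvUpdateKids, if_neg h0, pvFindC, ih_rest]
      by_cases h : c' = c
      · subst h; simp [h0]
      · simp [h]

theorem pvAccepts_insert (w : List Char) : ∀ (t : Bool × PvKids) (v : List Char),
    pvAccepts (pvInsert t w) v = (pvAccepts t v || decide (v = w)) := by
  induction w with
  | nil =>
    rintro ⟨term, kids⟩ v
    cases v <;> simp [pvInsert, pvAccepts]
  | cons c w ih =>
    rintro ⟨term, kids⟩ v
    cases v with
    | nil => simp [pvInsert, pvAccepts]
    | cons d v' =>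
      by_cases hd : d = c
      · subst hd
        cases h : pvFindC kids d <;>
          simp [pvInsert, pvAccepts, pvFindC_update, h, ih, pvAccepts_empty]
      · simp [pvInsert, pvAccepts, pvFindC_update, hd]

theorem pvAccepts_foldl (ps : List (List Char)) : ∀ (t : Bool × PvKids) (v : List Char),
    pvAccepts (ps.foldl pvInsert t) v = (pvAccepts t v || decide (v ∈ ps)) := by
  induction ps with
  | nil => intro t v; simp
  | cons p ps ih =>
    intro t v
    simp [List.foldl_cons, ih, pvAccepts_insert, Bool.or_assoc]

theorem pvAccepts_trie (v : List Char) : pvAccepts pvTrie v = decide (v ∈ pvPatrones) := by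
  simp [pvTrie, pvAccepts_foldl, pvAccepts_empty]

theorem pvStep_iff (cs : List Char) : ∀ (t : Bool × PvKids),
    pvStep t cs = true ↔ ∃ p, p <+: cs ∧ pvAccepts t p = true := by
  induction cs with
  | nil =>
    rintro ⟨term, kids⟩
    constructor
    · intro h; exact ⟨[], List.prefix_refl [], h⟩
    · rintro ⟨p, hp, ha⟩
      rcases List.prefix_nil.mp hp with rfl
      exact ha
  | cons c cs ih =>
    rintro ⟨term, kids⟩
    simp only [pvStep, Bool.or_eq_true]
    constructor
    · rintro (h | h)
      · exact ⟨[], List.nil_prefix, h⟩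
      · cases hf : pvFindC kids c with
        | none => rw [hf] at h; simp at h
        | some n =>
          rw [hf] at h
          rcases (ih n).mp (by simpa using h) with ⟨p, hp, ha⟩
          exact ⟨c :: p, List.cons_prefix_cons.mpr ⟨rfl, hp⟩, by simp [pvAccepts, hf, ha]⟩
    · rintro ⟨p, hp, ha⟩
      cases p with
      | nil => exact Or.inl ha
      | cons d p' =>
        rcases List.cons_prefix_cons.mp hp with ⟨rfl, hp'⟩
        cases hf : pvFindC kids d with
        | none => simp [pvAccepts, hf] at ha
        | some n =>
          refine Or.inr ?_
          simpa using (ih n).mpr ⟨p', hp', by simpa [pvAccepts, hf] using ha⟩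

theorem pvStep_trie (cs : List Char) :
    pvStep pvTrie cs = pvPatrones.any (fun p => decide (p <+: cs)) := by
  rw [Bool.eq_iff_iff, pvStep_iff]
  simp only [List.any_eq_true, decide_eq_true_eq]
  constructor
  · rintro ⟨p, hp, ha⟩
    rw [pvAccepts_trie] at ha
    exact ⟨p, by simpa using ha, hp⟩
  · rintro ⟨p, hp, hpre⟩
    exact ⟨p, hpre, by simp [pvAccepts_trie, hp]⟩

-- the trie scan over suffixes finds exactly the same hits as the per-pattern substring tests
theorem pvScanB_eq_any_isIn (t : List Char) :
    pvScanB t = pvPatrones.any (fun p => PySem.Chars.isIn p t) := by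
  induction t with
  | nil =>
    symm
    simp only [pvScanB, List.any_eq_false]
    intro p hp
    rw [Bool.not_eq_true, PySem.Chars.isIn_eq_false_iff]
    intro hin
    have : p ≠ [] := by fin_cases hp <;> decide
    exact this (List.eq_nil_of_infix_nil hin)
  | cons c r ih =>
    rw [pvScanB, pvStep_trie, ih, Bool.eq_iff_iff]
    simp only [Bool.or_eq_true, List.any_eq_true,
      decide_eq_true_eq, PySem.Chars.isIn_iff_infix]
    constructor
    · rintro (⟨p, hp, hpre⟩ | ⟨p, hp, hinf⟩)
      · exact ⟨p, hp, hpre.isInfix⟩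
      · exact ⟨p, hp, hinf.trans (List.suffix_cons c r).isInfix⟩
    · rintro ⟨p, hp, hinf⟩
      rcases List.infix_cons_iff.mp hinf with hpre | hinf'
      · exact Or.inl ⟨p, hp, hpre⟩
      · exact Or.inr ⟨p, hp, hinf'⟩

-- ===== VERDICT (by name: the statement is the Claim_ definition above) =====
theorem es_url_py_spec : Claim_equal_es_url_py := by
  intro texto _
  unfold Spec_es_url_py es_url_py es_url_py_alt
  split
  · rfl
  · rw [pvScanB_eq_any_isIn]
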